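/- GENERATED by tools/from_farm_form.py from prooffarm-gif/accepted/DGifGetLine.1/Lemmas.lean (a worked proof of the farm's unit `DGifGetLine.1`,
   accepted by the verdict) — do not edit. -/
import Gif.Spec.Units.DGifGetLine_1
import Gif.Spec.AllSegs

/-!
  Lemmas for the unit `DGifGetLine.1` (the tests of `DGifGetLine`, 0x10a230 … 0x10a28e and 0x10a2ab … 0x10a2c4, dgif_lib.c:486-502:
  a BODY SEGMENT of a protected function, no contract call, six check calls).

      gl1_Scratch      the windows the segment stores to: the stack below the body's stack pointer (the check calls' return
                       addresses), `gif.Error`, `pv.PixelCount`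
      gl1_carry        `Body cut … v` and a footprint of `gl1_Scratch` windows from `v` to `s` give `Body cut' … s`
      gl1_seg          the walk: `AfterP` at 0x10a230 → `AtCall` at 0x10a2c4 or `Done` at 0x10a28e
-/

open X86 X86.User Asan ProgX.Base ProgX.Base.Spec Gif.Spec

set_option maxRecDepth 4000
set_option maxHeartbeats 4000000

namespace Gif.Spec.DGifGetLine_1

/-- **A window this segment may store to**: the stack below the body's stack pointer (`RA − 120`: the return address that the call
of a check routine pushes), `gif.Error` (`[gif + 96, gif + 100)`, l.490 and l.499), `pv.PixelCount` (`[pv + 56, pv + 64)`, l.502). -/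
def gl1_Scratch (F : Forest) (e : State) (w : Span) : Prop :=
  ((e.reg .rsp).toNat - 688 ≤ w.lo ∧ w.hi ≤ (e.reg .rsp).toNat - 120) ∨
  (F.gif + 96 ≤ w.lo ∧ w.hi ≤ F.gif + 100) ∨
  (F.pv + 56 ≤ w.lo ∧ w.hi ≤ F.pv + 64)

/-- **`Body` THROUGH THE SEGMENT'S STORES.** `v` is a state with `Body`, `s` a later state of the segment: the stack pointer is the
body's, `rbp r15 r12` are what they were, the text is unchanged, the ABI's invariant holds, no shadow byte was written, and every
window written is a `gl1_Scratch` window. Then `Body` holds of `s` at the address `s` is at: the windows are loose (`GifOK`), heap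
windows (`HeapInv`), off the cursor (`rem`), off `[pv + 8, pv + 48)` (`LZOK`), off the saved registers' slots, inside the
contract's footprint. -/
theorem gl1_carry {cut cut' : Word} {H : Heap} {rest : List Obj} {frames : List (Nat × FrameLayout)} {F : Forest} {R : Rd}
    {n : Nat} {u₀ e : State} {ret : Word} {v s : State}
    (hb : DGifGetLine.Body cut H rest frames F R n u₀ e ret v)
    (hrip : s.rip = cut') (hrsp : s.reg .rsp = e.reg .rsp - 120)
    (hrbp : s.reg .rbp = v.reg .rbp) (hr15 : s.reg .r15 = v.reg .r15) (hr12 : s.reg .r12 = v.reg .r12)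
    (hcode : Mem.EqOn ProgX.Base.L.textLo ProgX.Base.L.textHi u₀.mem s.mem) (habi : (conv u₀).inv s)
    {ws : List Span} (hun : ShadowUntouched v.mem s.mem) (hs : Mem.SameExcept ws v.mem s.mem)
    (hws : ∀ w, w ∈ ws → gl1_Scratch F e w) :
    DGifGetLine.Body cut' H rest frames F R n u₀ e ret s := by
  have henv : Env H rest frames F R e := hb.pre.1
  have hroom : 0x700000 + 688 ≤ (e.reg .rsp).toNat := hb.entry.room
  have htop : (e.reg .rsp).toNat + 8 ≤ 0x800000 := hb.entry.top
  have hok := hb.inv.heap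
  have hbase := henv.heap.base
  have hcur := henv.ctx.cursor_range henv.heap.inv.shadow
  have hplaced := hb.ok.owns.placed hok
  -- where gif and pv are, as numbers
  have hgin := hb.ok.owns.inside hok (o := (F.gif, 120)) List.mem_cons_self
  have hpin := hb.ok.owns.inside hok (o := (F.pv, 24936)) (List.mem_cons_of_mem _ List.mem_cons_self)
  simp only at hgin hpin
  rw [hbase] at hgin hpin
  have hg1 := hgin.1
  have hg2 := hgin.2.2.2.2
  have hp1 := hpin.1
  have hp2 := hpin.2.2.2.2
  clear hgin hpin
  -- every window is loose
  have hloose : ∀ w, w ∈ ws → Loose H F R w := by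
    intro w hw
    rcases hws w hw with ⟨a, b⟩ | ⟨a, b⟩ | ⟨a, b⟩
    · exact Loose.stack hok (by omega) (by omega) (by omega)
    · exact Loose.gifScalar (Or.inr (Or.inr ⟨by omega, by omega⟩))
    · exact Loose.pvBody (Or.inl ⟨by omega, by omega⟩)
  -- every window is a heap window
  have hwin : ∀ w, w ∈ ws → HeapWin H w := by
    intro w hw
    rcases hws w hw with ⟨a, b⟩ | ⟨a, b⟩ | ⟨a, b⟩
    · apply HeapWin.offHeap hok
      left
      omega
    · exact HeapWin.gif hok hb.ok.owns (by omega) (by omega)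
    · exact HeapWin.pv hok hb.ok.owns (by omega) (by omega)
  -- every window misses the LZW scalars `[pv + 8, pv + 48)`
  have hmiss : ∀ w, w ∈ ws → w.hi ≤ F.pv + 8 ∨ F.pv + 48 ≤ w.lo := by
    intro w hw
    have hfar := hb.ok.owns.far hok (a := (F.gif, 120)) (b := (F.pv, 24936)) List.mem_cons_self
      (List.mem_cons_of_mem _ List.mem_cons_self) (by
        intro h
        exact hb.ok.gif_ne_pv (congrArg Prod.fst h))
    simp only at hfar
    rcases hws w hw with ⟨a, b⟩ | ⟨a, b⟩ | ⟨a, b⟩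
    · omega
    · omega
    · omega
  -- every window misses the cursor
  have hoffcur : ∀ w, w ∈ ws → w.hi ≤ R.cur ∨ R.cur + 16 ≤ w.lo := by
    intro w hw
    exact (hloose w hw).off_cursor hok hplaced ⟨hcur.1, hcur.2.1⟩
  -- every window misses the saved registers' slots and the return-address slot `[RA − 48, RA + 8)`
  have hslots : ∀ a k : Nat, ((e.reg .rsp).toNat - 48 ≤ a ∧ a + k ≤ (e.reg .rsp).toNat + 8) →
      ∀ w, w ∈ ws → a + k ≤ w.lo ∨ w.hi ≤ a := by
    intro a k hak w hw
    rcases hws w hw with ⟨p, q⟩ | ⟨p, q⟩ | ⟨p, q⟩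
    · omega
    · omega
    · omega
  -- the footprint since the entry: every window lies inside one of the contract's
  have hsameE : Mem.SameExcept
      [⟨(e.reg .rsp).toNat - 688, (e.reg .rsp).toNat⟩,
       shadowSpan ((e.reg .rsp).toNat - 120) ((e.reg .rsp).toNat - 56),
       ⟨(e.reg .rsi).toNat, (e.reg .rsi).toNat + n⟩,
       ⟨F.pv + 20, F.pv + 64⟩,
       ⟨F.pv + 88, F.pv + 344⟩,
       ⟨F.pv + 344, F.pv + 4439⟩,
       ⟨F.pv + 4439, F.pv + 8535⟩,
       ⟨F.pv + 8536, F.pv + 24920⟩,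
       ⟨F.gif + 96, F.gif + 100⟩,
       ⟨R.cur, R.cur + 8⟩] e.mem s.mem := by
    apply Mem.SameExcept.step_same' hb.same hs
    intro w hw
    by_cases hempty : w.hi ≤ w.lo
    · left
      exact hempty
    right
    rcases hws w hw with ⟨a, b⟩ | ⟨a, b⟩ | ⟨a, b⟩
    · exact ⟨⟨(e.reg .rsp).toNat - 688, (e.reg .rsp).toNat⟩, by simp only [List.mem_cons, true_or], by simp only; omega,
        by simp only; omega⟩
    · exact ⟨⟨F.gif + 96, F.gif + 100⟩, by simp only [List.mem_cons, true_or, or_true], by simp only; omega, by simp only; omega⟩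
    · exact ⟨⟨F.pv + 20, F.pv + 64⟩, by simp only [List.mem_cons, true_or, or_true], by simp only; omega, by simp only; omega⟩
  have e_rem : Gif.Spec.rem R s.mem = Gif.Spec.rem R v.mem := rem_sameExcept hs (by omega) hoffcur
  refine ⟨hb.entry, hb.pre, hrip, hrsp, ?_, ?_, ?_, ?_, ?_, ?_, ?_, ?_, ?_, ?_, ?_, ?_, ?_, ?_, hsameE,
    ProgX.Base.conv_code_in hcode, habi⟩
  · exact hrbp.trans hb.rbp
  · exact hr15.trans hb.r15
  · exact hr12.trans hb.r12
  · exact slot_sameExcept hs (e.reg .rsp) 8 8 _ (by omega) (by omega) hb.slot_r15 (hslots _ _ (by omega))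
  · exact slot_sameExcept hs (e.reg .rsp) 16 8 _ (by omega) (by omega) hb.slot_r14 (hslots _ _ (by omega))
  · exact slot_sameExcept hs (e.reg .rsp) 24 8 _ (by omega) (by omega) hb.slot_r13 (hslots _ _ (by omega))
  · exact slot_sameExcept hs (e.reg .rsp) 32 8 _ (by omega) (by omega) hb.slot_r12 (hslots _ _ (by omega))
  · exact slot_sameExcept hs (e.reg .rsp) 40 8 _ (by omega) (by omega) hb.slot_rbp (hslots _ _ (by omega))
  · exact slot_sameExcept hs (e.reg .rsp) 48 8 _ (by omega) (by omega) hb.slot_rbx (hslots _ _ (by omega))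
  · rw [hs.readLE (e.reg .rsp) 8 (by omega) (hslots _ _ (by omega))]
    exact hb.slot_ra
  · exact hb.inv.sameExcept hun hs hwin
  · exact hb.ok.sameExcept hok ⟨hcur.1, hcur.2.1⟩ hs hloose
  · exact hb.lz.sameExcept hs (by omega) hmiss
  · rw [e_rem]
    exact hb.rem

/-- **SEGMENT 1 OF `DGifGetLine`** (0x10a230 … 0x10a28e and 0x10a2ab … 0x10a2c4, dgif_lib.c:486-502): `AfterP` at 0x10a230 to
`AtCall` at 0x10a2c4 (the tests passed, `PixelCount −= LineLen` stored) or `Done` at 0x10a28e (`PixelCount < LineLen`: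
`gif.Error = 108`, `ebx = 0`). The arm `!IS_READABLE` (l.490) is pruned by `pv.FileState = 8` [PR3], the arm `!LineLen` (l.495) by
`1 ≤ n`; the arm `LineLen < 0` (l.498, `js`) is refuted at its exit by `n < 2 ^ 31`. -/
theorem gl1_seg (Lay : Layout) (hLay : Lay.hi = 0x1000000) (μ : Microarch) (hμ : UserX.MicroOK μ) (u₀ : State)
    (hcode : HasCodeNat Lay u₀ Gif.L.DGifGetLine.entry Gif.Code.code_DGifGetLine.nat Gif.L.DGifGetLine.size)
    (h_asan_load8_noabort : Asan.SmallCheck Lay μ ProgX.Base.WayInv (ProgX.Base.CodeOK u₀) [.rax, .rcx, .rdx] 8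
      ProgX.Base.L.__asan_load8_noabort.entry)
    (h_asan_load4_noabort : Asan.SmallCheck Lay μ ProgX.Base.WayInv (ProgX.Base.CodeOK u₀) [.rax, .rcx, .rdx] 4
      ProgX.Base.L.__asan_load4_noabort.entry)
    (h_asan_store4_noabort : Asan.SmallCheck Lay μ ProgX.Base.WayInv (ProgX.Base.CodeOK u₀) [.rax, .rcx, .rdx] 4
      ProgX.Base.L.__asan_store4_noabort.entry)
    (H : Heap) (rest : List Obj) (frames : List (Nat × FrameLayout)) (F : Forest) (R : Rd) (n : Nat) (e : State) (ret : Word)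
    (v : State) (hat : DGifGetLine.AfterP H rest frames F R n u₀ e ret v) :
    ReachVia Lay μ ProgX.Base.WayInv v (fun w =>
      DGifGetLine.AtCall H rest frames F R n u₀ e ret w ∨ DGifGetLine.Done H rest frames F R n u₀ e ret w) := by
  -- THE PRELUDE: the entry assertion `AfterP` = `Body` + `rdi = gif` + `r13 = LineLen`
  obtain ⟨hbody, c_rdi, hr13⟩ := hat
  have he := hbody.entry
  v_entry he
  obtain ⟨henv, hlz0, hrdi, hrdx, hn1, hn31, hbuf, hapart⟩ := hbody.pre
  -- what the walker reads of a segment's entry state: rip, rsp (as `c_rsp`), the registers, the text, DF / MXCSR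
  have w_rip := hbody.rip
  have c_rsp : v.reg .rsp = e.reg .rsp - 120 := hbody.rsp
  have c_rbp : v.reg .rbp = e.reg .rdi := hbody.rbp
  have c_r13 : v.reg .r13 = UInt64.ofNat n := by
    rw [← hr13, UInt64.ofNat_toNat]
  have w_kept : RegsKept [.rsp] v v := RegsKept.refl _ _
  have w_eq : Mem.EqOn ProgX.Base.L.textLo ProgX.Base.L.textHi u₀.mem v.mem := ProgX.Base.conv_code_eqOn hbody.code
  have hdf := (show abiInv _ from hbody.abi).1
  have hmx := (show abiInv _ from hbody.abi).2
  have hsse := ProgX.Base.sseOK_of_abiInv hbody.abi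
  -- where the cursor, gif and pv are, as numbers (`v_side`, `u_same`, `u_omega` place every access with them); only the
  -- linear parts: a divisibility fact in the context makes `omega` slow
  have hcur := henv.ctx.cursor_range henv.heap.inv.shadow
  have hbase := henv.heap.base
  have hgin := hbody.ok.owns.inside hbody.inv.heap (o := (F.gif, 120)) List.mem_cons_self
  have hpin := hbody.ok.owns.inside hbody.inv.heap (o := (F.pv, 24936)) (List.mem_cons_of_mem _ List.mem_cons_self)
  simp only at hgin hpin
  rw [hbase] at hgin hpin
  have hg1 := hgin.1
  have hg2 := hgin.2.2.2.2
  have hp1 := hpin.1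
  have hp2 := hpin.2.2.2.2
  clear hgin hpin he_align hapart
  -- gif and pv are live under the body's frames: what the check goals ask [G1 G2]
  have hgl : LiveIn (H.liveObjs ++ rest) (DGifGetLine.framesIn frames e) F.gif 120 :=
    hbody.ok.gif_live.liveIn rest _ (Nat.le_refl _) (Nat.le_refl _)
  have hpl : LiveIn (H.liveObjs ++ rest) (DGifGetLine.framesIn frames e) F.pv 24936 :=
    hbody.ok.pv_live.liveIn rest _ (Nat.le_refl _) (Nat.le_refl _)
  -- THE LOADS, as facts about `v.mem` in the walker's form: `gif.Private = pv` [G2], `pv.FileState = 8` [PR3], `pv.PixelCount`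
  -- (a variable `pc`)
  have hpriv := hbody.ok.shape.priv
  have hstate := hbody.ok.shape.state
  simp only [gfield] at hpriv hstate
  have l_priv : v.mem.readLE (e.reg .rdi + 0x70) 8 = F.pv := by
    rw [rd_eq_readLE v.mem (e.reg .rdi + 0x70) (F.gif + 112) 8 (by u_omega)]
    exact hpriv
  have l_fs : v.mem.readLE (UInt64.ofNat F.pv) 4 = 8 := by
    rw [rd_eq_readLE v.mem (UInt64.ofNat F.pv) (F.pv + 0) 4 (by u_omega)]
    exact hstate
  obtain ⟨pc, l_pc⟩ : ∃ pc, v.mem.readLE (UInt64.ofNat F.pv + 0x38) 8 = pc := ⟨_, rfl⟩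
  -- `r13d = LineLen` is `n`, not 0 (prunes the arm l.495) and not negative (refutes the arm of `js`)
  have hn32 : (Word.part Width.w32 (UInt64.ofNat n)).toNat = n := cnt32_part_toNat n (by omega)
  have hmsb : (Word.part Width.w32 (UInt64.ofNat n)).msb = false := bv32_msb_false _ (by omega)
  -- THE WALK, to the call of DGifDecompressLine's argument set-up (0x10a2c4) or the epilogue's first instruction (0x10a28e)
  u_walk hcode [hμ.vendor, cnt32_sext n hn31] until [Gif.L.DGifGetLine.at_10a2c4, Gif.L.DGifGetLine.at_10a28e]
    span [ProgX.Base.L.textLo, ProgX.Base.L.textHi] side (v_side)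
  case check_10a234 =>
    -- dgif_lib.c:486 the load of `GifFile->Private`: 8 bytes inside gif
    have hun : ShadowUntouched v.mem s_10a234.mem := by v_untouched
    exact hgl.accSmall hbody.inv.shadow hun _ 8 (by decide) (by u_omega) (by u_omega)
  case check_10a240 =>
    -- dgif_lib.c:488 the load of `Private->FileState`: 4 bytes inside pv
    have hun : ShadowUntouched v.mem s_10a240.mem := by v_untouched
    exact hpl.accSmall hbody.inv.shadow hun _ 4 (by decide) (by u_omega) (by u_omega)
  case check_10a268 =>
    -- dgif_lib.c:498 the load of `Private->PixelCount`: 8 bytes inside pv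
    have hun : ShadowUntouched v.mem s_10a268.mem := by v_untouched
    exact hpl.accSmall hbody.inv.shadow hun _ 8 (by decide) (by u_omega) (by u_omega)
  case check_10a27d =>
    -- dgif_lib.c:499 the store of `gif.Error`, on the (dead) arm `LineLen < 0`
    have hun : ShadowUntouched v.mem s_10a27d.mem := by v_untouched
    exact hgl.accSmall hbody.inv.shadow hun _ 4 (by decide) (by u_omega) (by u_omega)
  case check_10a27d =>
    -- dgif_lib.c:499 the store of `gif.Error`, on the arm `PixelCount < LineLen`
    have hun : ShadowUntouched v.mem s_10a27d.mem := by v_untouched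
    exact hgl.accSmall hbody.inv.shadow hun _ 4 (by decide) (by u_omega) (by u_omega)
  · -- 0x10a28e FROM 0x10a262 (`js` taken, dgif_lib.c:498 `LineLen < 0`): DEAD, `n < 2 ^ 31`
    exfalso
    rw [hmsb] at hbr_10a262
    exact Bool.false_ne_true hbr_10a262
  · -- 0x10a2c4 FROM 0x10a2c0 (dgif_lib.c:502): `LineLen ≤ PixelCount`, `PixelCount −= LineLen` stored
    have hun : ShadowUntouched v.mem s_10a2c0.mem := by v_untouched
    -- the stores since `v`: the check calls' return address (stack), `pv.PixelCount`
    have hs : Mem.SameExcept [⟨(e.reg .rsp).toNat - 688, (e.reg .rsp).toNat - 120⟩, ⟨F.pv + 56, F.pv + 64⟩]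
        v.mem s_10a2c0.mem := by
      rw [w_mem]
      u_same
    have habi : (conv u₀).inv s_10a2c0 := by
      refine ProgX.Base.abiInv_of ?_ ?_
      · rw [w_flags]
        simp only [X86.User.df_setStatus]
        exact w_df_10a268
      · rw [w_mxcsr]
        exact hmx
    -- THE EXIT ASSERTION: `Body` at 0x10a2c4 …
    have hb1 : DGifGetLine.Body Gif.L.DGifGetLine.at_10a2c4 H rest frames F R n u₀ e ret s_10a2c0 := by
      apply gl1_carry hbody w_rip w_rsp (w_kept.get .rbp rfl) (w_kept.get .r15 rfl) (w_kept.get .r12 rfl) w_eq habi hun hs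
      simp only [List.forall_mem_cons, List.not_mem_nil, false_imp_iff, implies_true, and_true, gl1_Scratch]
      omega
    -- … `r14 = Private`, `r13 = LineLen`
    refine ReachVia.done (Or.inl ⟨hb1, ?_, ?_⟩)
    · rw [w_r14]
      u_omega
    · rw [w_kept.get .r13 rfl]
      exact hr13
  · -- 0x10a28e FROM 0x10a289 (dgif_lib.c:499-500): `PixelCount < LineLen`, `gif.Error = D_GIF_ERR_DATA_TOO_BIG` stored, ebx = 0
    have hun : ShadowUntouched v.mem s_10a289.mem := by v_untouched
    -- the stores since `v`: the check calls' return address (stack), `gif.Error`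
    have hs : Mem.SameExcept [⟨(e.reg .rsp).toNat - 688, (e.reg .rsp).toNat - 120⟩, ⟨F.gif + 96, F.gif + 100⟩]
        v.mem s_10a289.mem := by
      rw [w_mem]
      u_same
    have habi : (conv u₀).inv s_10a289 := by
      refine ProgX.Base.abiInv_of ?_ ?_
      · rw [w_flags]
        exact w_df_10a27d
      · rw [w_mxcsr]
        exact hmx
    -- THE EXIT ASSERTION: `Body` at 0x10a28e …
    have hb1 : DGifGetLine.Body Gif.L.DGifGetLine.at_10a28e H rest frames F R n u₀ e ret s_10a289 := by
      apply gl1_carry hbody w_rip w_rsp (w_kept.get .rbp rfl) (w_kept.get .r15 rfl) (w_kept.get .r12 rfl) w_eq habi hun hs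
      simp only [List.forall_mem_cons, List.not_mem_nil, false_imp_iff, implies_true, and_true, gl1_Scratch]
      omega
    -- … and the result: GIF_ERROR in `ebx`
    refine ReachVia.done (Or.inr ⟨hb1, ?_⟩)
    right
    rw [w_rbx]
    decide

end Gif.Spec.DGifGetLine_1
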